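-- pv_equiv track=rewrite | github.com/WonJIPark2025/ocr-receipt-draft-reference | src/parsing/item_blocks.py | group_item_blocks
-- ===== SOURCE A (Python) =====
-- def group_item_blocks(lines: list[str]) -> list[list[str]]:
--     blocks = []
--     current = []
--
--     for line in lines:
--         # 상품 번호로 시작하면 새 블록
--         if line[:3].isdigit():
--             if current:
--                 blocks.append(current)
--             current = [line]
--         else:
--             if current:
--                 current.append(line)
--
--     if current:
--         blocks.append(current)
--
--     return blocks
-- ===== SOURCE B (Python) =====
-- def group_item_blocks(lines: list[str]) -> list[list[str]]:
--     def is_start(l: str) -> bool: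
--         return l[:3].isdigit()
--
--     def go(ls: list[str]) -> list[list[str]]:
--         # ls, if nonempty, begins with a start line: one block = head + following
--         # non-start lines, then recurse on the remainder.
--         if not ls:
--             return []
--         head, rest = ls[0], ls[1:]
--         k = 0
--         while k < len(rest) and not is_start(rest[k]):
--             k += 1
--         return [[head] + rest[:k]] + go(rest[k:])
--
--     i = 0
--     while i < len(lines) and not is_start(lines[i]):
--         i += 1
--     return go(lines[i:])
-- ===== Notes on version B (the rewrite author's own statement) =====
-- stated objective: alternative
-- what changed: Replaces A's single pass with a running (blocks, current) accumulator by a recursive span decomposition: drop the non-start prefix, then repeatedly cut one block as head + takewhile(not start) and recurse on the rest.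
import Mathlib
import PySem

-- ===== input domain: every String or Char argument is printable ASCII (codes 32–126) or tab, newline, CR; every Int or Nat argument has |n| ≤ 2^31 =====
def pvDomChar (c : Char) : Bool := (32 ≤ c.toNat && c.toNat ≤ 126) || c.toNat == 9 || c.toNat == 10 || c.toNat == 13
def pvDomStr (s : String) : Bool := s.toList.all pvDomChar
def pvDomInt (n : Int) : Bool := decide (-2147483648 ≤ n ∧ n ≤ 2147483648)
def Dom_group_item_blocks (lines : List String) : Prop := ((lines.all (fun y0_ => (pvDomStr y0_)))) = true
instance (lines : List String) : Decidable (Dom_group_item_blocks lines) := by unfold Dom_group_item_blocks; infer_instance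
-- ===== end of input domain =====

-- B replaces A's running (blocks, current) accumulator by a recursive span decomposition
-- (drop the non-start prefix, then cut one block at a time); objective: alternative, same cost.

-- shared guard: Python's line[:3].isdigit()
def pvIsStart (l : String) : Bool :=
  PySem.Chars.strIsdigit (PySem.List.slice l.toList none (some 3))

-- ===== PORT A =====
def pvStepA (s : List (List String) × List String) (line : String) :
    List (List String) × List String :=
  if pvIsStart line then
    (if s.2 = [] then s.1 else s.1 ++ [s.2], [line])
  else
    (s.1, if s.2 = [] then s.2 else s.2 ++ [line])

def pvFinishA (s : List (List String) × List String) : List (List String) :=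
  if s.2 = [] then s.1 else s.1 ++ [s.2]

def group_item_blocks (lines : List String) : List (List String) :=
  pvFinishA (lines.foldl pvStepA ([], []))

-- ===== PORT B =====
def pvGo : List String → List (List String)
  | [] => []
  | l :: rest =>
      (l :: rest.takeWhile (fun x => !pvIsStart x)) ::
        pvGo (rest.dropWhile (fun x => !pvIsStart x))
  termination_by ls => ls.length
  decreasing_by
    simpa using Nat.lt_succ_of_le (List.length_dropWhile_le _ rest)

def group_item_blocks_alt (lines : List String) : List (List String) :=
  pvGo (lines.dropWhile (fun x => !pvIsStart x))

-- ===== PRECONDITION & SPEC =====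
def Spec_group_item_blocks (lines : List String) (out : List (List String)) : Prop := out = group_item_blocks_alt lines
instance (lines : List String) (out : List (List String)) : Decidable (Spec_group_item_blocks lines out) := by unfold Spec_group_item_blocks; infer_instance

-- ===== CLAIM (what is proved, stated in full; the proofs are below) =====
def Claim_equal_group_item_blocks : Prop := ∀ (lines : List String), Dom_group_item_blocks lines → Spec_group_item_blocks lines (group_item_blocks lines)

-- ===== LEMMAS AND PROOFS =====
lemma pv_fold_inv (ls : List String) :
    ∀ (b : List (List String)) (c : List String),
      pvFinishA (ls.foldl pvStepA (b, c)) =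
        if c = [] then b ++ pvGo (ls.dropWhile (fun x => !pvIsStart x))
        else b ++ (c ++ ls.takeWhile (fun x => !pvIsStart x)) ::
               pvGo (ls.dropWhile (fun x => !pvIsStart x)) := by
  induction ls with
  | nil =>
      intro b c
      by_cases hc : c = [] <;> simp [pvFinishA, pvGo, hc]
  | cons l rest ih =>
      intro b c
      by_cases hl : pvIsStart l
      · by_cases hc : c = [] <;>
          simp [List.foldl_cons, pvStepA, hl, hc, ih, pvGo]
      · by_cases hc : c = [] <;>
          simp [List.foldl_cons, pvStepA, hl, hc, ih]

-- ===== VERDICT (by name: the statement is the Claim_ definition above) =====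
theorem group_item_blocks_spec : Claim_equal_group_item_blocks := by
  intro lines _
  unfold Spec_group_item_blocks group_item_blocks group_item_blocks_alt
  simpa using pv_fold_inv lines [] []
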